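-- pv_equiv track=rewrite | github.com/alphasingh/competitive-programming | codechef/long/2021_APRIL/2021_04_3_strong_language.py | contains_strong_language
-- ===== SOURCE A (Python) =====
-- def contains_strong_language(string: str, stars: int) -> bool:
--     max_consecutive_stars = current = 0
--     for character in string:
--         if character == '*':
--             current += 1
--         else:
--             if current > max_consecutive_stars:
--                 max_consecutive_stars = current
--             current = 0
--     return max(max_consecutive_stars, current) >= stars
-- ===== SOURCE B (Python) =====
-- def contains_strong_language(string: str, stars: int) -> bool:
--     if stars > len(string):
--         return False
--     return '*' * stars in string
-- ===== Notes on version B (the rewrite author's own statement) =====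
-- stated objective: idiomatic
-- what changed: Replaces the manual per-character run-counting loop with a direct substring test: after ruling out thresholds longer than the string, the longest star run reaches the threshold iff the string contains '*' repeated stars times ('' for stars <= 0, which is always contained).
import Mathlib
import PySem

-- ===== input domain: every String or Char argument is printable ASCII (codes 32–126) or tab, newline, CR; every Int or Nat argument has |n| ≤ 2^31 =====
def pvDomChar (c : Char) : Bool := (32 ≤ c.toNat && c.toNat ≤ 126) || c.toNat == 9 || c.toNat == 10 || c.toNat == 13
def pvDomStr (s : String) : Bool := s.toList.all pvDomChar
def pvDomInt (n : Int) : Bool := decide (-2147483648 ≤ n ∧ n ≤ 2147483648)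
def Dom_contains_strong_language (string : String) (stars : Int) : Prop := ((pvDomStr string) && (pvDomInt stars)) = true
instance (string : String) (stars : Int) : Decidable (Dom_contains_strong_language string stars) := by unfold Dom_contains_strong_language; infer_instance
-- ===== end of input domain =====

-- B replaces A's manual run-counting loop by the idiomatic substring test `'*' * stars in string`.

-- ===== PORT A =====
-- one loop step of A: bump the run counter on '*', else fold it into the max and reset
def pvStepA (st : Int × Int) (character : Char) : Int × Int :=
  if character = '*' then (st.1, st.2 + 1)
  else ((if st.2 > st.1 then st.2 else st.1), 0)

def contains_strong_language (string : String) (stars : Int) : Bool :=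
  let final := string.toList.foldl pvStepA (0, 0)
  decide (max final.1 final.2 ≥ stars)

-- ===== PORT B =====
-- a run longer than the string is impossible; else test for '*' * stars ('' for stars ≤ 0; Int.toNat clamps exactly like Python's repetition)
def contains_strong_language_alt (string : String) (stars : Int) : Bool :=
  if stars > PySem.Str.len string then false
  else PySem.Str.isIn (String.ofList (List.replicate stars.toNat '*')) string

-- ===== PRECONDITION & SPEC =====
def Spec_contains_strong_language (string : String) (stars : Int) (out : Bool) : Prop := out = contains_strong_language_alt string stars
instance (string : String) (stars : Int) (out : Bool) : Decidable (Spec_contains_strong_language string stars out) := by unfold Spec_contains_strong_language; infer_instance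

-- ===== CLAIM (what is proved, stated in full; the proofs are below) =====
def Claim_equal_contains_strong_language : Prop := ∀ (string : String) (stars : Int), Dom_contains_strong_language string stars → Spec_contains_strong_language string stars (contains_strong_language string stars)

-- ===== LEMMAS AND PROOFS =====

-- specification of A's loop: the max star run seen so far, with a pending run of length c
def pvGN : Nat → List Char → Nat
  | c, [] => c
  | c, x :: t => if x = '*' then pvGN (c + 1) t else max c (pvGN 0 t)

theorem pv_fold (l : List Char) : ∀ (m c : Nat),
    max (l.foldl pvStepA ((m : Int), (c : Int))).1 (l.foldl pvStepA ((m : Int), (c : Int))).2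
      = ((max m (pvGN c l) : Nat) : Int) := by
  induction l with
  | nil => intro m c; simp [pvGN, Nat.cast_max]
  | cons x t ih =>
    intro m c
    by_cases hx : x = '*'
    · have h1 : pvStepA ((m : Int), (c : Int)) x = ((m : Int), ((c + 1 : Nat) : Int)) := by
        simp [pvStepA, hx]
      rw [List.foldl_cons, h1, ih]
      simp [pvGN, hx]
    · have h1 : pvStepA ((m : Int), (c : Int)) x = (((max m c : Nat) : Int), ((0 : Nat) : Int)) := by
        simp only [pvStepA, hx, if_false, Nat.cast_zero, Nat.cast_max, Prod.mk.injEq]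
        refine ⟨?_, trivial⟩
        split_ifs with h <;> omega
      rw [List.foldl_cons, h1, ih]
      rw [pvGN]
      simp only [hx, if_false, Nat.cast_inj]
      omega

theorem pv_gn_le (l : List Char) : ∀ c, pvGN c l ≤ c + l.length := by
  induction l with
  | nil => intro c; simp [pvGN]
  | cons x t ih =>
    intro c
    rw [pvGN]
    split_ifs
    · have := ih (c + 1); simp only [List.length_cons]; omega
    · have := ih 0; simp only [List.length_cons]; omega

theorem pv_prefix_le (x : Char) (hx : x ≠ '*') :
    ∀ (k c : Nat) (t : List Char),
      List.replicate k '*' <+: (List.replicate c '*' ++ x :: t) → k ≤ c := by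
  intro k
  induction k with
  | zero => intro c t _; exact Nat.zero_le c
  | succ k ih =>
    intro c t h
    cases c with
    | zero =>
      rw [List.replicate_succ, List.replicate_zero, List.nil_append] at h
      rcases List.cons_prefix_cons.1 h with ⟨heq, -⟩
      exact absurd heq.symm hx
    | succ c =>
      rw [List.replicate_succ, List.replicate_succ (n := c), List.cons_append] at h
      rcases List.cons_prefix_cons.1 h with ⟨-, h'⟩
      exact Nat.succ_le_succ (ih c t h')

theorem pv_boundary (x : Char) (hx : x ≠ '*') (k : Nat) (hk : 1 ≤ k) :
    ∀ (c : Nat) (t : List Char),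
      (List.replicate k '*' <:+: (List.replicate c '*' ++ x :: t) ↔
        k ≤ c ∨ List.replicate k '*' <:+: t) := by
  intro c
  induction c with
  | zero =>
    intro t
    constructor
    · intro h
      rw [List.replicate_zero, List.nil_append] at h
      rcases List.infix_cons_iff.1 h with hpre | hinf
      · obtain ⟨k', rfl⟩ : ∃ k', k = k' + 1 := ⟨k - 1, by omega⟩
        rw [List.replicate_succ] at hpre
        rcases List.cons_prefix_cons.1 hpre with ⟨heq, -⟩
        exact absurd heq.symm hx
      · exact Or.inr hinf
    · rintro (h | h)
      · exact absurd h (by omega)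
      · exact h.trans ((List.suffix_cons x t).isInfix)
  | succ c ih =>
    intro t
    constructor
    · intro h
      rw [List.replicate_succ, List.cons_append] at h
      rcases List.infix_cons_iff.1 h with hpre | hinf
      · have : List.replicate k '*' <+: (List.replicate (c + 1) '*' ++ x :: t) := by
          rwa [List.replicate_succ, List.cons_append]
        exact Or.inl (pv_prefix_le x hx k (c + 1) t this)
      · rcases (ih t).1 hinf with h' | h'
        · exact Or.inl (Nat.le_succ_of_le h')
        · exact Or.inr h'
    · rintro (h | h)
      · refine List.IsPrefix.isInfix ?_
        refine ⟨List.replicate (c + 1 - k) '*' ++ x :: t, ?_⟩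
        rw [← List.append_assoc, ← List.replicate_add]
        congr 2
        omega
      · exact h.trans (((List.suffix_cons x t).trans (List.suffix_append _ _)).isInfix)

theorem pv_main2 (l : List Char) : ∀ (c k : Nat), 1 ≤ k →
    (k ≤ pvGN c l ↔ List.replicate k '*' <:+: (List.replicate c '*' ++ l)) := by
  induction l with
  | nil =>
    intro c k hk
    rw [pvGN, List.append_nil]
    constructor
    · intro h
      refine List.IsPrefix.isInfix ⟨List.replicate (c - k) '*', ?_⟩
      rw [← List.replicate_add]; congr 1; omega
    · intro h
      have := h.sublist.length_le
      simpa using this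
  | cons x t ih =>
    intro c k hk
    by_cases hx : x = '*'
    · subst hx
      rw [pvGN, if_pos rfl]
      rw [ih (c + 1) k hk]
      rw [List.replicate_succ' (n := c), List.append_assoc, List.singleton_append]
    · rw [pvGN, if_neg hx]
      rw [le_max_iff, ih 0 k hk]
      simp only [List.replicate_zero, List.nil_append]
      exact (pv_boundary x hx k hk c t).symm

-- ===== VERDICT (by name: the statement is the Claim_ definition above) =====
theorem contains_strong_language_spec : Claim_equal_contains_strong_language := by
  intro string stars _
  unfold Spec_contains_strong_language contains_strong_language contains_strong_language_alt
  have hfold := pv_fold string.toList 0 0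
  simp only [Nat.cast_zero] at hfold
  simp only [hfold, Nat.max_eq_right (Nat.zero_le _)]
  have hgle := pv_gn_le string.toList 0
  by_cases hlen : stars > PySem.Str.len string
  · rw [if_pos hlen]
    have hl : PySem.Str.len string = (string.toList.length : Int) := by
      simp [PySem.Str.len_eq]
    rw [hl] at hlen
    apply decide_eq_false
    omega
  rw [if_neg hlen]
  simp only [PySem.Str.isIn_eq, String.toList_ofList]
  by_cases hs : stars ≤ 0
  · have h0 : stars.toNat = 0 := by omega
    rw [h0, List.replicate_zero, PySem.Chars.isIn_nil]
    exact decide_eq_true (by omega)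
  · have hk : 1 ≤ stars.toNat := by omega
    have h2 := pv_main2 string.toList 0 stars.toNat hk
    simp only [List.replicate_zero, List.nil_append] at h2
    cases h : PySem.Chars.isIn (List.replicate stars.toNat '*') string.toList with
    | true =>
      have hinf := (PySem.Chars.isIn_iff_infix _ _).1 h
      have hge := h2.2 hinf
      exact decide_eq_true (by omega)
    | false =>
      have hninf := (PySem.Chars.isIn_eq_false_iff _ _).1 h
      apply decide_eq_false
      intro hge
      exact hninf (h2.1 (by omega))
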